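-- pv_equiv track=rewrite | github.com/jinxyou/UIUC-ECE448 | mp07/submitted.py | update
-- ===== SOURCE A (Python) =====
-- import copy, queue
--
-- def update(lis, dic):
--     new_lis=copy.deepcopy(lis)
--     flag = True
--     while flag:
--         for i, e in enumerate(new_lis):
--             if e in dic.keys():
--                 new_lis[i] = dic[e]
--                 break
--         else:
--             flag = False
--
--     return new_lis
-- ===== SOURCE B (Python) =====
-- def update(lis, dic):
--     def follow(x):
--         while x in dic:
--             x = dic[x]
--         return x
--     return [follow(x) for x in lis]
-- ===== Notes on version B (the rewrite author's own statement) =====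
-- stated objective: faster
-- what changed: Instead of repeatedly rescanning the list from the start and replacing one element per scan, B makes a single pass and follows the dict chain for each element directly.
import Mathlib
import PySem

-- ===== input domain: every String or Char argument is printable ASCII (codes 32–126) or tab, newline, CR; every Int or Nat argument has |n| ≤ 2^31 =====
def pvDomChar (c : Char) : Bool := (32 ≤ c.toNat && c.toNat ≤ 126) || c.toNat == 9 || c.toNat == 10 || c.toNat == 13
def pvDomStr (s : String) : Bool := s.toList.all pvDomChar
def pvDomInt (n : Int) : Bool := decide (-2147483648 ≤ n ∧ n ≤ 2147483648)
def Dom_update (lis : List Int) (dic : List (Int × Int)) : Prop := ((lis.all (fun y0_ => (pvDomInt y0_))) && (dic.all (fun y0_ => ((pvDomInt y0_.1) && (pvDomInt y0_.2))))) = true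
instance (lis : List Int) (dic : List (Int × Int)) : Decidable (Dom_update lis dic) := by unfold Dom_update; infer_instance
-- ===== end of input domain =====

-- B replaces A's repeated rescan-from-the-start (one replacement per scan) by a single
-- pass that follows the dict chain for each element directly.
-- Both Pythons diverge on chains that cycle; Pre_ excludes exactly those inputs.

-- ===== PORT A =====
-- first-match lookup in the association list (the Python dict; keys are unique)
def pyLookup (dic : List (Int × Int)) (x : Int) : Option Int :=
  match dic with
  | [] => none
  | (k, v) :: rest => if k = x then some v else pyLookup rest x

-- A's inner 'for … break / else' pass: replace the FIRST element that is a dict key.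
def replaceFirst (dic : List (Int × Int)) : List Int → Option (List Int)
  | [] => none
  | x :: xs =>
    match pyLookup dic x with
    | some v => some (v :: xs)
    | none => (replaceFirst dic xs).map (x :: ·)

-- A's 'while flag' loop; fuel bounds the number of iterations (it suffices on Pre_).
def updateLoop (dic : List (Int × Int)) : Nat → List Int → List Int
  | 0, l => l
  | fuel + 1, l =>
    match replaceFirst dic l with
    | some l' => updateLoop dic fuel l'
    | none => l

def update (lis : List Int) (dic : List (Int × Int)) : List Int :=
  updateLoop dic (lis.length * (dic.length + 1)) lis

-- ===== PORT B =====
-- Source B's 'while x in dic: x = dic[x]'; fuel bounds the steps (dic.length+1 suffices on Pre_).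
def pyFollow (dic : List (Int × Int)) : Nat → Int → Int
  | 0, x => x
  | n + 1, x =>
    match pyLookup dic x with
    | none => x
    | some v => pyFollow dic n v

def update_alt (lis : List Int) (dic : List (Int × Int)) : List Int :=
  lis.map (pyFollow dic (dic.length + 1))

-- ===== PRECONDITION & SPEC =====
-- one replacement step: map a key to its (first) value, leave a non-key fixed
def chainStep (dic : List (Int × Int)) (x : Int) : Int :=
  ((dic.find? (fun p => p.1 == x)).map Prod.snd).getD x

-- Pre_ excludes exactly the inputs on which both Pythons loop forever: some element's
-- replacement chain through dic never leaves the key set (a terminating chain visits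
-- distinct keys, hence reaches a non-key within dic.length + 1 steps).
def Pre_update (lis : List Int) (dic : List (Int × Int)) : Prop :=
  ∀ x ∈ lis, ∃ n ≤ dic.length + 1, (chainStep dic)^[n] x ∉ dic.map Prod.fst
instance (lis : List Int) (dic : List (Int × Int)) : Decidable (Pre_update lis dic) := by
  unfold Pre_update; infer_instance

def pvWitness_update : List Int × (List (Int × Int)) := ([1, 2, 7], [(1, 2), (2, 3)])

def Spec_update (lis : List Int) (dic : List (Int × Int)) (out : List Int) : Prop := out = update_alt lis dic
instance (lis : List Int) (dic : List (Int × Int)) (out : List Int) : Decidable (Spec_update lis dic out) := by unfold Spec_update; infer_instance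

-- ===== CLAIM (what is proved, stated in full; the proofs are below) =====
def Claim_equal_update : Prop := ∀ (lis : List Int) (dic : List (Int × Int)), Dom_update lis dic → Pre_update lis dic → Spec_update lis dic (update lis dic)

-- ===== LEMMAS AND PROOFS =====

theorem lookup_eq_find (dic : List (Int × Int)) (x : Int) :
    pyLookup dic x = (dic.find? (fun p => p.1 == x)).map Prod.snd := by
  induction dic with
  | nil => rfl
  | cons p rest ih =>
    obtain ⟨k, v⟩ := p
    by_cases hk : k = x
    · simp [pyLookup, List.find?, hk]
    · have hb : (k == x) = false := by simpa using hk
      simp only [pyLookup, if_neg hk, ih, List.find?, hb]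

theorem chainStep_eq (dic : List (Int × Int)) (x : Int) :
    chainStep dic x = (pyLookup dic x).getD x := by
  rw [chainStep, lookup_eq_find]

theorem lookup_none_iff (dic : List (Int × Int)) (x : Int) :
    pyLookup dic x = none ↔ x ∉ dic.map Prod.fst := by
  induction dic with
  | nil => simp [pyLookup]
  | cons p rest ih =>
    obtain ⟨k, v⟩ := p
    by_cases hk : k = x
    · simp [pyLookup, hk]
    · simp [pyLookup, if_neg hk, ih, Ne.symm hk]

-- pyFollow is the iterate of chainStep (a non-key is fixed by both)
theorem follow_eq_iterate (dic : List (Int × Int)) :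
    ∀ (n : Nat) (x : Int), pyFollow dic n x = (chainStep dic)^[n] x := by
  intro n
  induction n with
  | zero => intro x; rfl
  | succ n ih =>
    intro x
    rw [Function.iterate_succ_apply]
    cases hx : pyLookup dic x with
    | none =>
      have hfix : chainStep dic x = x := by simp [chainStep_eq, hx]
      rw [hfix, Function.iterate_fixed hfix]
      simp [pyFollow, hx]
    | some v =>
      have hv : chainStep dic x = v := by simp [chainStep_eq, hx]
      rw [hv]
      simp only [pyFollow, hx]
      exact ih v

-- number of chain steps taken from x within the given fuel
def chainCnt (dic : List (Int × Int)) : Nat → Int → Nat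
  | 0, _ => 0
  | n + 1, x =>
    match pyLookup dic x with
    | none => 0
    | some v => chainCnt dic n v + 1

theorem follow_nonkey (dic : List (Int × Int)) (x : Int)
    (h : pyLookup dic x = none) : ∀ n, pyFollow dic n x = x := by
  intro n; cases n with
  | zero => rfl
  | succ n => simp [pyFollow, h]

theorem follow_done (dic : List (Int × Int)) :
    ∀ (n : Nat) (x : Int), pyLookup dic (pyFollow dic n x) = none →
      pyFollow dic (n + 1) x = pyFollow dic n x := by
  intro n
  induction n with
  | zero => intro x h; simp [pyFollow] at h ⊢; simp [h]
  | succ n ih =>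
    intro x h
    cases hx : pyLookup dic x with
    | none => simp [pyFollow, hx]
    | some v =>
      simp only [pyFollow, hx] at h ⊢
      exact ih v h

theorem follow_add_done (dic : List (Int × Int)) (n : Nat) (x : Int)
    (h : pyLookup dic (pyFollow dic n x) = none) :
    ∀ k, pyFollow dic (n + k) x = pyFollow dic n x := by
  intro k
  induction k with
  | zero => rfl
  | succ k ih =>
    have : pyLookup dic (pyFollow dic (n + k) x) = none := by rw [ih]; exact h
    calc pyFollow dic (n + k + 1) x = pyFollow dic (n + k) x := follow_done dic (n + k) x this
      _ = pyFollow dic n x := ih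

-- the closed-form Pre_ condition gives 'the full-fuel chase is done'
theorem pre_done (dic : List (Int × Int)) (x : Int)
    (h : ∃ n ≤ dic.length + 1, (chainStep dic)^[n] x ∉ dic.map Prod.fst) :
    pyLookup dic (pyFollow dic (dic.length + 1) x) = none := by
  obtain ⟨n, hn, hd'⟩ := h
  have hd : pyLookup dic (pyFollow dic n x) = none := by
    rw [follow_eq_iterate]; exact (lookup_none_iff dic _).mpr hd'
  have := follow_add_done dic n x hd (dic.length + 1 - n)
  rw [Nat.add_sub_cancel' hn] at this
  rw [this]
  exact hd

theorem chainCnt_succ (dic : List (Int × Int)) (n : Nat) (x v : Int)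
    (h : pyLookup dic x = some v) : chainCnt dic (n + 1) x = chainCnt dic n v + 1 := by
  simp [chainCnt, h]

theorem map_follow_nonkey (dic : List (Int × Int)) (n : Nat) :
    ∀ (l : List Int), (∀ x ∈ l, pyLookup dic x = none) →
      l.map (pyFollow dic n) = l := by
  intro l
  induction l with
  | nil => intro _; rfl
  | cons a l ih =>
    intro h
    simp only [List.map_cons]
    rw [follow_nonkey dic a (h a (by simp)) n, ih (fun x hx => h x (by simp [hx]))]

theorem cnt_done (dic : List (Int × Int)) :
    ∀ (n : Nat) (x : Int), pyLookup dic (pyFollow dic n x) = none →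
      chainCnt dic (n + 1) x = chainCnt dic n x := by
  intro n
  induction n with
  | zero => intro x h; simp [pyFollow] at h; simp [chainCnt, h]
  | succ n ih =>
    intro x h
    cases hx : pyLookup dic x with
    | none => simp [chainCnt, hx]
    | some v =>
      simp only [pyFollow, hx] at h
      rw [chainCnt_succ dic (n + 1) x v hx, chainCnt_succ dic n x v hx, ih v h]

theorem cnt_le (dic : List (Int × Int)) : ∀ (n : Nat) (x : Int), chainCnt dic n x ≤ n := by
  intro n
  induction n with
  | zero => intro x; simp [chainCnt]
  | succ n ih =>
    intro x
    cases hx : pyLookup dic x with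
    | none => simp [chainCnt, hx]
    | some v => simp only [chainCnt, hx]; exact Nat.succ_le_succ (ih v)

theorem replaceFirst_none (dic : List (Int × Int)) :
    ∀ (l : List Int), replaceFirst dic l = none →
      ∀ x ∈ l, pyLookup dic x = none := by
  intro l
  induction l with
  | nil => intro _ x hx; simp at hx
  | cons a l ih =>
    intro h x hx
    cases ha : pyLookup dic a with
    | some v => simp [replaceFirst, ha] at h
    | none =>
      simp only [replaceFirst, ha] at h
      have h' : replaceFirst dic l = none := by
        cases hrl : replaceFirst dic l with
        | none => rfl
        | some t => rw [hrl] at h; simp at h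
      rcases List.mem_cons.mp hx with rfl | hx
      · exact ha
      · exact ih h' x hx

theorem replaceFirst_some (dic : List (Int × Int)) :
    ∀ (l l' : List Int), replaceFirst dic l = some l' →
      ∃ p x v s, l = p ++ x :: s ∧ (∀ y ∈ p, pyLookup dic y = none) ∧
        pyLookup dic x = some v ∧ l' = p ++ v :: s := by
  intro l
  induction l with
  | nil => intro l' h; simp [replaceFirst] at h
  | cons a l ih =>
    intro l' h
    cases ha : pyLookup dic a with
    | some v =>
      simp only [replaceFirst, ha, Option.some.injEq] at h
      exact ⟨[], a, v, l, by simp, by simp, ha, by simp [h]⟩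
    | none =>
      simp only [replaceFirst, ha] at h
      cases hrl : replaceFirst dic l with
      | none => rw [hrl] at h; simp at h
      | some l'' =>
        rw [hrl] at h
        simp only [Option.map_some, Option.some.injEq] at h
        obtain ⟨p, x, v, s, hl, hp, hx, hl'⟩ := ih l'' hrl
        refine ⟨a :: p, x, v, s, by simp [hl], ?_, hx, by simp [← h, hl']⟩
        intro y hy
        rcases List.mem_cons.mp hy with rfl | hy
        · exact ha
        · exact hp y hy

-- one chain step preserves termination, the resolved value, and drops the count by one
theorem step_resolve (dic : List (Int × Int)) (x v : Int)
    (hx : pyLookup dic x = some v)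
    (ht : pyLookup dic (pyFollow dic (dic.length + 1) x) = none) :
    pyLookup dic (pyFollow dic (dic.length + 1) v) = none ∧
    pyFollow dic (dic.length + 1) v = pyFollow dic (dic.length + 1) x ∧
    chainCnt dic (dic.length + 1) x = chainCnt dic (dic.length + 1) v + 1 := by
  have hstep : pyFollow dic (dic.length + 1) x = pyFollow dic dic.length v := by
    simp [pyFollow, hx]
  have hdone : pyLookup dic (pyFollow dic dic.length v) = none := hstep ▸ ht
  have hfv : pyFollow dic (dic.length + 1) v = pyFollow dic dic.length v :=
    follow_done dic dic.length v hdone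
  refine ⟨hfv ▸ hdone, by rw [hfv, hstep], ?_⟩
  have hc : chainCnt dic (dic.length + 1) v = chainCnt dic dic.length v :=
    cnt_done dic dic.length v hdone
  rw [chainCnt_succ dic dic.length x v hx, hc]

-- main loop invariant: with enough fuel the rescan loop computes the per-element chase
theorem loop_eq_map (dic : List (Int × Int)) :
    ∀ (fuel : Nat) (l : List Int),
      (∀ x ∈ l, pyLookup dic (pyFollow dic (dic.length + 1) x) = none) →
      (l.map (chainCnt dic (dic.length + 1))).sum ≤ fuel →
      updateLoop dic fuel l = l.map (pyFollow dic (dic.length + 1)) := by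
  intro fuel
  induction fuel with
  | zero =>
    intro l ht hs
    have hz : ∀ x ∈ l, chainCnt dic (dic.length + 1) x = 0 := by
      intro x hx
      have := List.sum_eq_zero_iff.mp (Nat.le_zero.mp hs)
      exact this _ (List.mem_map_of_mem hx)
    have : ∀ x ∈ l, pyLookup dic x = none := by
      intro x hx
      have h0 := hz x hx
      cases h : pyLookup dic x with
      | none => rfl
      | some v => simp [chainCnt, h] at h0
    simp only [updateLoop]
    exact (map_follow_nonkey dic _ l this).symm
  | succ fuel ih =>
    intro l ht hs
    cases hr : replaceFirst dic l with
    | none =>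
      have hnk := replaceFirst_none dic l hr
      simp only [updateLoop, hr]
      exact (map_follow_nonkey dic _ l hnk).symm
    | some l' =>
      obtain ⟨p, x, v, s, rfl, hp, hx, rfl⟩ := replaceFirst_some dic l _ hr
      have htx := ht x (by simp)
      obtain ⟨htv, hfv, hcx⟩ := step_resolve dic x v hx htx
      have ht' : ∀ y ∈ p ++ v :: s, pyLookup dic (pyFollow dic (dic.length + 1) y) = none := by
        intro y hy
        rcases List.mem_append.mp hy with hy | hy
        · exact ht y (List.mem_append.mpr (Or.inl hy))
        · rcases List.mem_cons.mp hy with rfl | hy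
          · exact htv
          · exact ht y (List.mem_append.mpr (Or.inr (List.mem_cons.mpr (Or.inr hy))))
      have hs' : ((p ++ v :: s).map (chainCnt dic (dic.length + 1))).sum ≤ fuel := by
        have h1 : ((p ++ x :: s).map (chainCnt dic (dic.length + 1))).sum
            = ((p ++ v :: s).map (chainCnt dic (dic.length + 1))).sum + 1 := by
          simp [List.map_append, List.sum_append, hcx]; ring
        omega
      simp only [updateLoop, hr]
      rw [ih _ ht' hs']
      simp [List.map_append, hfv]

-- ===== VERDICT (by name: the statement is the Claim_ definition above) =====
theorem update_spec : Claim_equal_update := by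
  intro lis dic _ hpre
  unfold Spec_update update update_alt
  apply loop_eq_map dic _ lis (fun x hx => pre_done dic x (hpre x hx))
  calc (lis.map (chainCnt dic (dic.length + 1))).sum
      ≤ (lis.map (fun _ => dic.length + 1)).sum := by
        apply List.sum_le_sum
        intro x hx
        exact cnt_le dic _ x
    _ = lis.length * (dic.length + 1) := by simp
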